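-- pv_equiv track=rewrite | github.com/ISUCT/Algorythm_1_42_2020 | src/contest_module_4/task_one.py | PSP
-- ===== SOURCE A (Python) =====
-- def PSP(s):
--     Counter = 0
--     my_list = []
--     for i in s:
--         if (i == '('):
--             my_list.append(i)
--         elif (my_list != []) and (my_list[-1] == '('):
--             my_list.pop()
--         else:
--             Counter += 1
--     return Counter+len(my_list)
-- ===== SOURCE B (Python) =====
-- def PSP(s):
--     b = 0
--     m = 0
--     for i in s:
--         b += 1 if i == '(' else -1
--         if b < m:
--             m = b
--     return b - 2 * m
-- ===== Notes on version B (the rewrite author's own statement) =====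
-- stated objective: simpler
-- what changed: Replaced the explicit stack with a branchless running balance plus minimum-prefix-balance tracking; the answer is the closed form b - 2*m.
import Mathlib
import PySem

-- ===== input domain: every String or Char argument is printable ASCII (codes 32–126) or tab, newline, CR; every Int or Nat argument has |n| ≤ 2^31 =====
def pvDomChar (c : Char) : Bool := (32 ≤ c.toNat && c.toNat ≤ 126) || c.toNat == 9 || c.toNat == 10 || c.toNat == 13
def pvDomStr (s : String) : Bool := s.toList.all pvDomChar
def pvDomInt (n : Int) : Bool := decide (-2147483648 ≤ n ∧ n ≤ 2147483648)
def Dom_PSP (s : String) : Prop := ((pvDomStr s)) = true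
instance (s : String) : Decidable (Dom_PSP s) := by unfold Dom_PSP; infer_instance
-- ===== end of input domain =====

-- B replaces A's explicit stack by a branchless running balance with minimum-prefix tracking (closed form b - 2*m); objective: simpler.

-- ===== PORT A =====
-- one loop step of A: state = (Counter, my_list); append/pop are at the list's END, as in Python
def PSP_step (st : Int × List Char) (i : Char) : Int × List Char :=
  if i = '(' then (st.1, st.2 ++ ['('])
  else if st.2 ≠ [] ∧ st.2.getLast? = some '(' then (st.1, st.2.dropLast)
  else (st.1 + 1, st.2)

def PSP (s : String) : Int :=
  let st := s.toList.foldl PSP_step (0, [])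
  st.1 + st.2.length

-- ===== PORT B =====
-- one loop step of B: state = (b, m)
def PSP_alt_step (st : Int × Int) (i : Char) : Int × Int :=
  let b := st.1 + (if i = '(' then 1 else -1)
  (b, if b < st.2 then b else st.2)

def PSP_alt (s : String) : Int :=
  let st := s.toList.foldl PSP_alt_step (0, 0)
  st.1 - 2 * st.2

-- ===== PRECONDITION & SPEC =====
def Spec_PSP (s : String) (out : Int) : Prop := out = PSP_alt s
instance (s : String) (out : Int) : Decidable (Spec_PSP s out) := by unfold Spec_PSP; infer_instance

-- ===== CLAIM (what is proved, stated in full; the proofs are below) =====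
def Claim_equal_PSP : Prop := ∀ (s : String), Dom_PSP s → Spec_PSP s (PSP s)

-- ===== LEMMAS AND PROOFS =====

-- invariant tying A's state (c, lst) to B's state (b, m): the stack holds only '(',
-- its length is b - m, and c = -m; here n = lst.length carried as a Nat
theorem PSP_invariant (cs : List Char) (c b m : Int) (n : Nat)
    (hlst : m ≤ 0) (hc : c = -m) (hn : (n : Int) = b - m) :
    (cs.foldl PSP_step (c, List.replicate n '(')).1
      + ((cs.foldl PSP_step (c, List.replicate n '(')).2.length : Int)
    = (cs.foldl PSP_alt_step (b, m)).1 - 2 * (cs.foldl PSP_alt_step (b, m)).2 := by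
  induction cs generalizing c b m n with
  | nil => simp [hc, hn]; omega
  | cons i cs ih =>
    simp only [List.foldl_cons]
    by_cases hi : i = '('
    · have hA : PSP_step (c, List.replicate n '(') i = (c, List.replicate (n+1) '(') := by
        simp [PSP_step, hi, List.replicate_succ' (n := n)]
      have hB : PSP_alt_step (b, m) i = (b + 1, m) := by
        simp only [PSP_alt_step, hi]
        have : ¬ (b + 1 < m) := by omega
        simp [this]
      rw [hA, hB]
      exact ih c (b+1) m (n+1) hlst hc (by push_cast; omega)
    · cases n with
      | zero =>
        have hA : PSP_step (c, List.replicate 0 '(') i = (c + 1, List.replicate 0 '(') := by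
          simp [PSP_step, hi]
        have hB : PSP_alt_step (b, m) i = (b - 1, m - 1) := by
          have hb : b = m := by omega
          simp only [PSP_alt_step, hi]
          have : b + -1 < m := by omega
          simp [this]; omega
        rw [hA, hB]
        exact ih (c+1) (b-1) (m-1) 0 (by omega) (by omega) (by push_cast; omega)
      | succ k =>
        have hA : PSP_step (c, List.replicate (k+1) '(') i = (c, List.replicate k '(') := by
          simp [PSP_step, hi, List.getLast?_replicate, List.dropLast_replicate]
        have hB : PSP_alt_step (b, m) i = (b - 1, m) := by
          simp only [PSP_alt_step, hi]
          have : ¬ (b + -1 < m) := by push_cast at hn; omega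
          simp [this]; omega
        rw [hA, hB]
        exact ih c (b-1) m k hlst hc (by push_cast at hn ⊢; omega)

-- ===== VERDICT (by name: the statement is the Claim_ definition above) =====
theorem PSP_spec : Claim_equal_PSP := by
  intro s _
  unfold Spec_PSP PSP PSP_alt
  simpa using PSP_invariant s.toList 0 0 0 0 (le_refl 0) (by omega) (by simp)
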